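-- pv_equiv track=rewrite | github.com/priyakdey/interview-prep | dsa-practice/leetcode/test_py.py | stockBuySell
-- ===== SOURCE A (Python) =====
-- def stockBuySell(A, n):
--     profit = []
--     max_price = A[0]
--
--     max_price_index = 0
--     buying_price_index = 0
--
--     for i in range(1, n):
--         price = A[i]
--         if price < max_price:
--             profit.append([buying_price_index, max_price_index])
--             buying_price_index = i
--
--         max_price = price
--         max_price_index = i
--
--     if buying_price_index != max_price_index:
--         profit.append([buying_price_index, max_price_index])
--
--     return profit
-- ===== SOURCE B (Python) =====
-- def stockBuySell(A, n):
--     if n <= 1: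
--         return []
--     # positions where the price strictly drops from the previous day
--     drops = [i for i in range(1, n) if A[i] < A[i - 1]]
--     # segments: start at 0 and at each drop; end just before each drop and at n-1
--     segs = [[s, e] for s, e in zip([0] + drops, [d - 1 for d in drops] + [n - 1])]
--     # the final (open) segment is reported only when it is non-degenerate
--     if segs[-1][0] == segs[-1][1]:
--         segs.pop()
--     return segs
-- ===== Notes on version B (the rewrite author's own statement) =====
-- stated objective: alternative
-- what changed: B replaces A's single stateful scan (carrying max_price/buy indices) with a declarative decomposition: it first collects the strict-drop positions, then pairs segment starts [0]+drops with ends [d-1 for d in drops]+[n-1] via zip, and finally pops the last segment when degenerate.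
import Mathlib
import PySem

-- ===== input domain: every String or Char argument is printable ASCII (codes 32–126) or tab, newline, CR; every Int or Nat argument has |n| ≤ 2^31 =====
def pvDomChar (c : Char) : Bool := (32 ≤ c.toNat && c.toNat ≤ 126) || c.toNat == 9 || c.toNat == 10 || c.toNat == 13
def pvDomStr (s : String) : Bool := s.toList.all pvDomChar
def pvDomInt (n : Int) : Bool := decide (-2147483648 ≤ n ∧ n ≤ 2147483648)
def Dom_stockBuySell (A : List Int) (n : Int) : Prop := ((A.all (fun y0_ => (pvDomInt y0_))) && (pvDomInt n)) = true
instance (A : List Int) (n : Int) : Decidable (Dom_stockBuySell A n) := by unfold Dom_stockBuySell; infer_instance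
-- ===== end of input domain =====

-- B replaces A's stateful scan with a drop-positions / zip-of-segment-bounds decomposition (same O(n) cost).


-- ===== PORT A =====
-- state tuple: (profit, max_price, max_price_index, buying_price_index)
def stockBuySell (A : List Int) (n : Int) : List (List Int) :=
  let s := (PySem.List.pyRange 1 n 1).foldl
    (fun (st : List (List Int) × Int × Int × Int) i =>
      let price := PySem.List.pyGetD A i 0
      let st1 := if price < st.2.1 then (st.1 ++ [[st.2.2.2, st.2.2.1]], i) else (st.1, st.2.2.2)
      (st1.1, price, i, st1.2))
    ([], PySem.List.pyGetD A 0 0, 0, 0)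
  if s.2.2.2 ≠ s.2.2.1 then s.1 ++ [[s.2.2.2, s.2.2.1]] else s.1

def stockBuySell_alt (A : List Int) (n : Int) : List (List Int) :=
  if n ≤ 1 then []
  else
    let drops := (PySem.List.pyRange 1 n 1).filter
      (fun i => PySem.List.pyGetD A i 0 < PySem.List.pyGetD A (i - 1) 0)
    let segs := (List.zip (0 :: drops) (drops.map (fun d => d - 1) ++ [n - 1])).map
      (fun p => [p.1, p.2])
    match segs.getLast? with
    | some [s, e] => if s = e then segs.dropLast else segs
    | _ => segs


-- ===== PRECONDITION & SPEC =====
-- Pre_: Python A raises IndexError on A = [] (A[0]) and whenever 2 ≤ n > len(A) (A[i] in the loop);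
-- n ≤ len(A) also keeps every loop access in range.
def Pre_stockBuySell (A : List Int) (n : Int) : Prop := A ≠ [] ∧ n ≤ (A.length : Int)
instance (A : List Int) (n : Int) : Decidable (Pre_stockBuySell A n) := by unfold Pre_stockBuySell; infer_instance
def pvWitness_stockBuySell : List Int × Int := ([7, 1, 5, 3, 6, 4], 6)
def Spec_stockBuySell (A : List Int) (n : Int) (out : List (List Int)) : Prop := out = stockBuySell_alt A n
instance (A : List Int) (n : Int) (out : List (List Int)) : Decidable (Spec_stockBuySell A n out) := by unfold Spec_stockBuySell; infer_instance

-- ===== CLAIM (what is proved, stated in full; the proofs are below) =====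
def Claim_equal_stockBuySell : Prop := ∀ (A : List Int) (n : Int), Dom_stockBuySell A n → Pre_stockBuySell A n → Spec_stockBuySell A n (stockBuySell A n)

-- ===== LEMMAS AND PROOFS =====

-- drop positions in range(1, n)
def pvDrops (A : List Int) (m : Int) : List Int :=
  (PySem.List.pyRange 1 m 1).filter
    (fun i => PySem.List.pyGetD A i 0 < PySem.List.pyGetD A (i - 1) 0)

def pvSegs (D : List Int) : List (List Int) :=
  (List.zip (0 :: D) (D.map (fun d => d - 1))).map (fun p => [p.1, p.2])

theorem pvZip_snoc (g : Int → Int) :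
    ∀ (D : List Int) (x z : Int) (tail : List Int),
      List.zip (x :: D ++ tail) (D.map g ++ [z]) =
        List.zip (x :: D) (D.map g) ++ [(D.getLastD x, z)] := by
  intro D
  induction D with
  | nil => intro x z tail; simp
  | cons d D ih =>
      intro x z tail
      simp only [List.map_cons, List.cons_append, List.zip_cons_cons, List.getLastD_cons]
      rw [← List.cons_append, ih d z tail]

theorem pvSegs_snoc (D : List Int) (m : Int) :
    pvSegs (D ++ [m]) = pvSegs D ++ [[D.getLastD 0, m - 1]] := by
  unfold pvSegs
  simp only [List.map_append, List.map_cons, List.map_nil]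
  rw [show (0:Int) :: (D ++ [m]) = 0 :: D ++ [m] from rfl,
    pvZip_snoc (fun d => d - 1) D 0 (m - 1) [m]]
  simp

theorem pvDrops_succ (A : List Int) (m : Int) (hm : 1 ≤ m) :
    pvDrops A (m + 1) =
      pvDrops A m ++
        (if PySem.List.pyGetD A m 0 < PySem.List.pyGetD A (m - 1) 0 then [m] else []) := by
  unfold pvDrops
  rw [PySem.List.pyRange_one_succ_right hm, List.filter_append]
  by_cases h : PySem.List.pyGetD A m 0 < PySem.List.pyGetD A (m - 1) 0 <;> simp [h]

theorem pvLoopA_inv (A : List Int) (k : Nat) :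
    (PySem.List.pyRange 1 (1 + (k : Int)) 1).foldl
      (fun (st : List (List Int) × Int × Int × Int) i =>
        let price := PySem.List.pyGetD A i 0
        let st1 := if price < st.2.1 then (st.1 ++ [[st.2.2.2, st.2.2.1]], i) else (st.1, st.2.2.2)
        (st1.1, price, i, st1.2))
      ([], PySem.List.pyGetD A 0 0, 0, 0)
    = (pvSegs (pvDrops A (1 + (k : Int))), PySem.List.pyGetD A (k : Int) 0, (k : Int),
        (pvDrops A (1 + (k : Int))).getLastD 0) := by
  induction k with
  | zero =>
      rw [PySem.List.pyRange_one_eq_nil (by norm_num)]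
      simp [pvDrops, PySem.List.pyRange_one_eq_nil, pvSegs]
  | succ k ih =>
      have hk1 : (((k : Nat) + 1 : Nat) : Int) = (k : Int) + 1 := by push_cast; ring
      rw [hk1, show (1 : Int) + ((k : Int) + 1) = (1 + (k : Int)) + 1 by ring,
        PySem.List.pyRange_one_succ_right (by omega), List.foldl_append, ih]
      have hd := pvDrops_succ A (1 + (k : Int)) (by omega)
      rw [show (1 : Int) + (k : Int) - 1 = (k : Int) by ring] at hd
      by_cases h : PySem.List.pyGetD A (1 + (k : Int)) 0 < PySem.List.pyGetD A ((k : Int)) 0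
      · rw [hd, if_pos h]
        simp only [List.foldl_cons, List.foldl_nil, if_pos h, pvSegs_snoc]
        rw [add_comm (1 : Int) (k : Int)]
        refine Prod.ext ?_ (Prod.ext ?_ (Prod.ext ?_ ?_)) <;> simp
      · rw [hd, if_neg h]
        simp only [List.foldl_cons, List.foldl_nil, if_neg h, List.append_nil]
        rw [add_comm (1 : Int) (k : Int)]

theorem stockBuySell_eq_alt (A : List Int) (n : Int) :
    stockBuySell A n = stockBuySell_alt A n := by
  by_cases hn : n ≤ 1
  · unfold stockBuySell stockBuySell_alt
    rw [PySem.List.pyRange_one_eq_nil hn]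
    simp [hn]
  · have hk : n = 1 + (((n - 1).toNat : Nat) : Int) := by omega
    unfold stockBuySell stockBuySell_alt
    rw [if_neg hn]
    conv_lhs => rw [hk]
    rw [pvLoopA_inv A (n - 1).toNat, show (((n - 1).toNat : Nat) : Int) = n - 1 by omega,
      show (1 : Int) + (n - 1) = n by ring]
    show (if (pvDrops A n).getLastD 0 ≠ n - 1
            then pvSegs (pvDrops A n) ++ [[(pvDrops A n).getLastD 0, n - 1]]
            else pvSegs (pvDrops A n)) = _
    have hsegs :
        (List.zip (0 :: pvDrops A n) ((pvDrops A n).map (fun d => d - 1) ++ [n - 1])).map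
            (fun p => [p.1, p.2])
          = pvSegs (pvDrops A n) ++ [[(pvDrops A n).getLastD 0, n - 1]] := by
      rw [show (0:Int) :: pvDrops A n = 0 :: pvDrops A n ++ [] by simp,
        pvZip_snoc (fun d => d - 1) (pvDrops A n) 0 (n - 1) []]
      simp [pvSegs]
    show _ = (let segs := (List.zip (0 :: pvDrops A n)
        ((pvDrops A n).map (fun d => d - 1) ++ [n - 1])).map (fun p => [p.1, p.2])
      match segs.getLast? with
      | some [s, e] => if s = e then segs.dropLast else segs
      | _ => segs)
    simp only []
    rw [hsegs, List.getLast?_concat]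
    simp

-- ===== VERDICT (by name: the statement is the Claim_ definition above) =====
theorem stockBuySell_spec : Claim_equal_stockBuySell := by
  intro A n _ _
  unfold Spec_stockBuySell
  exact stockBuySell_eq_alt A n
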